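-- pv_equiv track=rewrite | github.com/szm4c/H8PW | cwiczenia5.py | wstaw_wiersz
-- ===== SOURCE A (Python) =====
-- def wstaw_wiersz(A, b, i):  #cwiczenie 9
--     assert len(A[0]) == len(b), "wiersz musi byc tej samej dlugosci co inne wiersze w liscie"
--     assert i >= 0 and i < len(A) + 1, "wiersz trzeba wstawic na 0-n pozycji"  #len(A) +1 żebyśmy mogli wstawić na ostatnie miejsce
--
--     B = [[0 for a in range(len(A[0]))] for b in range(len(A) + 1)] #tworzymy macierz, ktora ma jeden wiersz wiecej
--
--     for n in range(i):
--             B[n] = A[n]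
--
--     B[i] = b #wstawiamy wiersz
--
--     m = len(B) - 1 #od ostatniego indeksu
--
--     while m != i:  #uzupelniamy wierszami z A
--         B[m] = A[m - 1]
--         m -= 1
--
--     return B
-- ===== SOURCE B (Python) =====
-- def wstaw_wiersz(A, b, i):  #cwiczenie 9
--     assert len(A[0]) == len(b), "wiersz musi byc tej samej dlugosci co inne wiersze w liscie"
--     assert i >= 0 and i < len(A) + 1, "wiersz trzeba wstawic na 0-n pozycji"  #len(A) +1 żebyśmy mogli wstawić na ostatnie miejsce
--
--     result = []
--     for idx, row in enumerate(A):
--         if idx == i: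
--             result.append(b)
--         result.append(row)
--     if i == len(A):
--         result.append(b)
--     return result
-- ===== Notes on version B (the rewrite author's own statement) =====
-- stated objective: simpler
-- what changed: Replaces the preallocated zero matrix filled by a forward prefix loop plus a backward while-loop suffix with a single forward pass that appends b when the running index equals i (and after the loop when i == len(A)).
import Mathlib
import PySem

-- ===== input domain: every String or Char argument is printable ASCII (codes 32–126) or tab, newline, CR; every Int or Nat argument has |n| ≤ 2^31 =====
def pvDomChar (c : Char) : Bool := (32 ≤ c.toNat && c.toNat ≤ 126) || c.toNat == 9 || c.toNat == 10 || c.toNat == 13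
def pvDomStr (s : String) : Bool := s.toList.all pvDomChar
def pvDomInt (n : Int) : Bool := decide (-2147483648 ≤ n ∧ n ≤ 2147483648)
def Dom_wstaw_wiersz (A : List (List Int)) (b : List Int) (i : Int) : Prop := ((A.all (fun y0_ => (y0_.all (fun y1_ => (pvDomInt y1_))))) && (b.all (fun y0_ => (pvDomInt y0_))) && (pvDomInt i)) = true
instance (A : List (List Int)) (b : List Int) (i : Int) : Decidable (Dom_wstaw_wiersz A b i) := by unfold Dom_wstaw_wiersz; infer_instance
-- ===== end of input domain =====

-- B replaces A's preallocate-zero-matrix-then-fill (prefix forward, suffix backward) with one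
-- forward accumulation pass; objective: simpler. Return-value equivalence only (neither mutates its
-- arguments observably).

-- ===== PORT A =====
-- the backward while-loop 'while m != i: B[m] = A[m-1]; m -= 1', started at m = j + t with fuel t = m - i
def pvFillBack (A : List (List Int)) (j : Nat) : Nat → List (List Int) → List (List Int)
  | 0, B => B
  | t+1, B => pvFillBack A j t (B.set (j + t + 1) (A.getD (j + t) []))

def wstaw_wiersz (A : List (List Int)) (b : List Int) (i : Int) : List (List Int) :=
  -- asserts raise outside Pre_; inside Pre_ i = j with 0 ≤ j ≤ A.length
  let j := i.toNat
  let B0 := List.replicate (A.length + 1) (List.replicate (A.headD []).length (0 : Int))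
  let B1 := (List.range j).foldl (fun B n => B.set n (A.getD n [])) B0
  let B2 := B1.set j b
  pvFillBack A j (B2.length - 1 - j) B2

-- ===== PORT B =====
-- the 'for idx, row in enumerate(A)' loop with accumulator 'result'
def pvAltGo (b : List Int) (i : Int) : Nat → List (List Int) → List (List Int) → List (List Int)
  | _, acc, [] => acc
  | idx, acc, row :: rest =>
      pvAltGo b i (idx + 1) ((if (idx : Int) = i then acc ++ [b] else acc) ++ [row]) rest

def wstaw_wiersz_alt (A : List (List Int)) (b : List Int) (i : Int) : List (List Int) :=
  let r := pvAltGo b i 0 [] A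
  if i = (A.length : Int) then r ++ [b] else r

-- ===== PRECONDITION & SPEC =====
-- Pre_ excludes exactly the inputs where A raises: IndexError on empty A (A[0]) and the two asserts.
def Pre_wstaw_wiersz (A : List (List Int)) (b : List Int) (i : Int) : Prop :=
  A ≠ [] ∧ (A.headD []).length = b.length ∧ 0 ≤ i ∧ i < (A.length : Int) + 1
instance (A : List (List Int)) (b : List Int) (i : Int) : Decidable (Pre_wstaw_wiersz A b i) := by
  unfold Pre_wstaw_wiersz; infer_instance
def pvWitness_wstaw_wiersz : List (List Int) × List Int × Int := ([[1, 2], [3, 4]], [5, 6], 1)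

def Spec_wstaw_wiersz (A : List (List Int)) (b : List Int) (i : Int) (out : List (List Int)) : Prop := out = wstaw_wiersz_alt A b i
instance (A : List (List Int)) (b : List Int) (i : Int) (out : List (List Int)) : Decidable (Spec_wstaw_wiersz A b i out) := by unfold Spec_wstaw_wiersz; infer_instance

-- ===== CLAIM (what is proved, stated in full; the proofs are below) =====
def Claim_equal_wstaw_wiersz : Prop := ∀ (A : List (List Int)) (b : List Int) (i : Int), Dom_wstaw_wiersz A b i → Pre_wstaw_wiersz A b i → Spec_wstaw_wiersz A b i (wstaw_wiersz A b i)

-- ===== LEMMAS AND PROOFS =====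

-- prefix loop: after 'for n in range(j): B[n] = A[n]' the first j rows are A's
theorem pvPrefix_spec (A : List (List Int)) (B0 : List (List Int)) (j : Nat)
    (hA : j ≤ A.length) (hB : j ≤ B0.length) :
    (List.range j).foldl (fun B n => B.set n (A.getD n [])) B0 = A.take j ++ B0.drop j := by
  induction j with
  | zero => simp
  | succ k ih =>
    have hk : k < A.length := by omega
    have hkB : k < B0.length := by omega
    rw [List.range_succ, List.foldl_append, ih (by omega) (by omega)]
    simp only [List.foldl_cons, List.foldl_nil]
    have hlen : (A.take k).length = k := by simp [Nat.min_eq_left (le_of_lt hk)]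
    rw [List.set_append, hlen, if_neg (lt_irrefl k), Nat.sub_self,
        List.drop_eq_getElem_cons hkB, List.set_cons_zero,
        List.getD_eq_getElem A [] hk]
    have h3 : List.take (k + 1) A = List.take k A ++ [A[k]] := by
      rw [List.take_add_one, List.getElem?_eq_getElem hk]; rfl
    rw [h3, List.append_assoc]
    rfl

-- backward while-loop: positions j+1 .. j+t get A's rows j .. j+t-1
theorem pvFillBack_spec (A : List (List Int)) (b : List Int) (j : Nat) :
    ∀ (t : Nat) (P L : List (List Int)), P.length = j → t ≤ L.length → j + t ≤ A.length →
    pvFillBack A j t (P ++ b :: L) = P ++ b :: ((A.drop j).take t ++ L.drop t) := by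
  intro t
  induction t with
  | zero => intro P L _ _ _; simp [pvFillBack]
  | succ k ih =>
    intro P L hP hL hA
    have hkL : k < L.length := by omega
    have hjk : j + k < A.length := by omega
    rw [pvFillBack]
    have hset : (P ++ b :: L).set (j + k + 1) (A.getD (j + k) []) = P ++ b :: L.set k (A.getD (j + k) []) := by
      rw [List.set_append, if_neg (by omega), hP]
      have h1 : j + k + 1 - j = k + 1 := by omega
      rw [h1, List.set_cons_succ]
    rw [hset, ih P _ hP (by simp; omega) (by omega)]
    have htk : (L.take k).length = k := by simp [Nat.min_eq_left (le_of_lt hkL)]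
    have hd : (L.set k (A.getD (j + k) [])).drop k = A.getD (j + k) [] :: L.drop (k + 1) := by
      calc (L.set k (A.getD (j + k) [])).drop k
          = ((L.take k) ++ A.getD (j + k) [] :: L.drop (k + 1)).drop (L.take k).length := by
            rw [List.set_eq_take_append_cons_drop, if_pos hkL, htk]
        _ = A.getD (j + k) [] :: L.drop (k + 1) := List.drop_append_length
    rw [hd, List.getD_eq_getElem A [] hjk, List.take_add_one,
        List.getElem?_eq_getElem (by simp; omega : k < (A.drop j).length)]
    simp [List.getElem_drop]

-- A's port computes insertion at j
theorem wstaw_wiersz_eq (A : List (List Int)) (b : List Int) (i : Int)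
    (hne : A ≠ []) (h0 : 0 ≤ i) (hlt : i < (A.length : Int) + 1) :
    wstaw_wiersz A b i = A.take i.toNat ++ b :: A.drop i.toNat := by
  obtain ⟨j, rfl⟩ : ∃ j : Nat, i = (j : Int) := ⟨i.toNat, (Int.toNat_of_nonneg h0).symm⟩
  have hjle : j ≤ A.length := by exact_mod_cast Int.lt_add_one_iff.mp hlt
  simp only [wstaw_wiersz, Int.toNat_natCast]
  set z := List.replicate (A.headD []).length (0 : Int) with hz
  rw [pvPrefix_spec A _ j hjle (by simp; omega)]
  have hdrop : (List.replicate (A.length + 1) z).drop j = z :: List.replicate (A.length - j) z := by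
    rw [List.drop_replicate]
    have h2 : A.length + 1 - j = (A.length - j) + 1 := by omega
    rw [h2, List.replicate_succ]
  rw [hdrop]
  have htlen : (A.take j).length = j := by simp [Nat.min_eq_left hjle]
  have hset : (A.take j ++ z :: List.replicate (A.length - j) z).set j b
      = A.take j ++ b :: List.replicate (A.length - j) z := by
    rw [List.set_append, if_neg (by omega), htlen, Nat.sub_self, List.set_cons_zero]
  rw [hset]
  have hlen2 : (A.take j ++ b :: List.replicate (A.length - j) z).length = A.length + 1 := by
    simp [htlen]; omega
  rw [hlen2]
  have ht : A.length + 1 - 1 - j = A.length - j := by omega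
  rw [ht, pvFillBack_spec A b j (A.length - j) (A.take j) _ htlen (by simp) (by omega)]
  have htake : (A.drop j).take (A.length - j) = A.drop j :=
    List.take_of_length_le (by simp)
  simp [htake]

-- B's loop when the insertion index is never reached
theorem pvAltGo_past (b : List Int) (j : Nat) :
    ∀ (A acc : List (List Int)) (idx : Nat), ¬ (idx ≤ j ∧ j < idx + A.length) →
    pvAltGo b (j : Int) idx acc A = acc ++ A := by
  intro A
  induction A with
  | nil => intro acc idx _; simp [pvAltGo]
  | cons row rest ih =>
    intro acc idx h
    simp only [List.length_cons] at h
    have hne : idx ≠ j := by omega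
    simp only [pvAltGo]
    rw [if_neg (by exact_mod_cast hne), ih _ (idx + 1) (by omega)]
    simp

-- B's loop when the insertion index falls inside the list
theorem pvAltGo_spec (b : List Int) (j : Nat) :
    ∀ (A acc : List (List Int)) (idx : Nat), idx ≤ j → j - idx < A.length →
    pvAltGo b (j : Int) idx acc A = acc ++ A.take (j - idx) ++ b :: A.drop (j - idx) := by
  intro A
  induction A with
  | nil => intro acc idx _ h; simp at h
  | cons row rest ih =>
    intro acc idx hle hlt
    by_cases he : idx = j
    · subst he
      simp only [pvAltGo]
      rw [pvAltGo_past b idx rest _ (idx + 1) (by omega)]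
      simp
    · have hlt' : idx < j := by omega
      simp only [pvAltGo]
      rw [if_neg (fun hc => he (by exact_mod_cast hc))]
      rw [ih _ (idx + 1) (by omega) (by simp only [List.length_cons] at hlt; omega)]
      have hji : j - idx = (j - (idx + 1)) + 1 := by omega
      rw [hji]
      simp

-- B's port computes insertion at j
theorem wstaw_wiersz_alt_eq (A : List (List Int)) (b : List Int) (i : Int)
    (h0 : 0 ≤ i) (hlt : i < (A.length : Int) + 1) :
    wstaw_wiersz_alt A b i = A.take i.toNat ++ b :: A.drop i.toNat := by
  obtain ⟨j, rfl⟩ : ∃ j : Nat, i = (j : Int) := ⟨i.toNat, (Int.toNat_of_nonneg h0).symm⟩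
  have hjle : j ≤ A.length := by exact_mod_cast Int.lt_add_one_iff.mp hlt
  simp only [wstaw_wiersz_alt, Int.toNat_natCast]
  by_cases hend : j = A.length
  · rw [if_pos (by exact_mod_cast hend), pvAltGo_past b j A [] 0 (by omega)]
    subst hend
    simp
  · rw [if_neg (fun hc => hend (by exact_mod_cast hc))]
    rw [pvAltGo_spec b j A [] 0 (by omega) (by omega)]
    simp

-- ===== VERDICT (by name: the statement is the Claim_ definition above) =====
theorem wstaw_wiersz_spec : Claim_equal_wstaw_wiersz := by
  intro A b i _ hpre
  obtain ⟨hne, _, h0, hlt⟩ := hpre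
  unfold Spec_wstaw_wiersz
  rw [wstaw_wiersz_eq A b i hne h0 hlt, wstaw_wiersz_alt_eq A b i h0 hlt]
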